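-- pv_equiv track=rewrite | github.com/sl-harris/aoc-2024 | day17/main.py | get_a_range
-- ===== SOURCE A (Python) =====
-- def get_a_range(indices):
--     levels = len(indices)
--     range_from = 8**levels
--
--     for level in range(1, len(indices) + 1):
--         range_from += (indices[-level]) * (8 ** (levels - level + 1))
--
--     range_from -= 8**levels
--
--     range_end = range_from + 8 - 1
--
--     return range_from, range_end
-- ===== SOURCE B (Python) =====
-- def get_a_range(indices):
--     acc = 0
--     for d in reversed(indices):
--         acc = acc * 8 + d
--     range_from = acc * 8
--     return range_from, range_from + 7
-- ===== Notes on version B (the rewrite author's own statement) =====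
-- stated objective: faster
-- what changed: Replaced the explicit-power positional sum with negative indexing (indices[-level] * 8**(levels-level+1)) and the cancelling 8**levels offset by a single Horner accumulator over the reversed digit list; no powers or negative indices are computed.
import Mathlib
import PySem

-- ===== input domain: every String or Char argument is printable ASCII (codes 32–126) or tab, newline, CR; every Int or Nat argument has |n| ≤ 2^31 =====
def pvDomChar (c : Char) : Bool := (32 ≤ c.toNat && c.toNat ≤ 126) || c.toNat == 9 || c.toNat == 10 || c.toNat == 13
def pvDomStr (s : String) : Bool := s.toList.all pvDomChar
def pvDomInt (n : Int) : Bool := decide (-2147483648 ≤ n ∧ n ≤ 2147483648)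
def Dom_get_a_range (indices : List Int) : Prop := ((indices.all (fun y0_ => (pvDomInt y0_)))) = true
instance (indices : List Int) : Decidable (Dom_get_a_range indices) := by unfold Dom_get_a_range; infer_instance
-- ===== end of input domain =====

-- B replaces A's explicit-power positional sum (with its cancelling 8**levels offset) by a
-- single Horner accumulator over the reversed digit list: simpler, no powers computed.

-- ===== PORT A =====
def get_a_range (indices : List Int) : Int × Int :=
  let levels : Int := indices.length
  let range_from : Int := 8 ^ levels.toNat
  let range_from :=
    (PySem.List.pyRange 1 ((indices.length : Int) + 1) 1).foldl
      (fun acc level =>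
        acc + (PySem.List.pyGetD indices (-level) 0) * 8 ^ (levels - level + 1).toNat)
      range_from
  let range_from := range_from - 8 ^ levels.toNat
  let range_end := range_from + 8 - 1
  (range_from, range_end)

-- ===== PORT B =====
def get_a_range_alt (indices : List Int) : Int × Int :=
  let acc := indices.reverse.foldl (fun a d => a * 8 + d) 0
  let range_from := acc * 8
  (range_from, range_from + 7)

-- ===== PRECONDITION & SPEC =====
def Spec_get_a_range (indices : List Int) (out : Int × Int) : Prop := out = get_a_range_alt indices
instance (indices : List Int) (out : Int × Int) : Decidable (Spec_get_a_range indices out) := by unfold Spec_get_a_range; infer_instance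

-- ===== CLAIM (what is proved, stated in full; the proofs are below) =====
def Claim_equal_get_a_range : Prop := ∀ (indices : List Int), Dom_get_a_range indices → Spec_get_a_range indices (get_a_range indices)

-- ===== LEMMAS AND PROOFS =====

-- Horner value of the digit list (head least significant) — B's accumulator.
theorem pv_alt_acc (l : List Int) :
    l.reverse.foldl (fun a d => a * 8 + d) 0 = l.foldr (fun d a => a * 8 + d) 0 := by
  rw [List.foldl_reverse]

-- A's loop sum equals 8 * Horner value.
theorem pv_sum_horner (l : List Int) :
    ((PySem.List.pyRange 1 ((l.length : Int) + 1) 1).map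
      (fun level => (PySem.List.pyGetD l (-level) 0) * 8 ^ (((l.length : Int) - level + 1).toNat))).sum
      = 8 * l.foldr (fun d a => a * 8 + d) 0 := by
  induction l with
  | nil => simp [PySem.List.pyRange_one_eq_nil]
  | cons d t ih =>
    have hlen : ((d :: t).length : Int) = (t.length : Int) + 1 := by simp
    rw [hlen]
    have hsplit : PySem.List.pyRange 1 (((t.length : Int) + 1) + 1) 1
        = PySem.List.pyRange 1 ((t.length : Int) + 1) 1 ++ [(t.length : Int) + 1] := by
      exact PySem.List.pyRange_one_succ_right (by omega)
    rw [hsplit, List.map_append, List.sum_append]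
    -- the last loop iteration (level = n+1) contributes d * 8
    have hlast : (PySem.List.pyGetD (d :: t) (-((t.length : Int) + 1)) 0)
        * 8 ^ ((((t.length : Int) + 1) - ((t.length : Int) + 1) + 1).toNat) = d * 8 := by
      have hk : -((t.length : Int) + 1) = -(((t.length + 1 : Nat) : Int)) := by push_cast; ring
      rw [hk, PySem.List.pyGetD_neg_natCast (d :: t) (t.length + 1) 0 (by omega) (by simp)]
      simp
    -- each earlier iteration contributes 8 times its contribution for the tail
    have hmap : (PySem.List.pyRange 1 ((t.length : Int) + 1) 1).map
        (fun level => (PySem.List.pyGetD (d :: t) (-level) 0)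
          * 8 ^ ((((t.length : Int) + 1) - level + 1).toNat))
        = (PySem.List.pyRange 1 ((t.length : Int) + 1) 1).map
        (fun level => 8 * ((PySem.List.pyGetD t (-level) 0)
          * 8 ^ (((t.length : Int) - level + 1).toNat))) := by
      apply List.map_congr_left
      intro level hmem
      rw [PySem.List.mem_pyRange_one] at hmem
      obtain ⟨h1, h2⟩ := hmem
      have hkn : level = ((level.toNat : Nat) : Int) := by omega
      have h1n : 0 < level.toNat := by omega
      have h2n : level.toNat ≤ t.length := by omega
      rw [hkn, PySem.List.pyGetD_neg_natCast (d :: t) level.toNat 0 h1n (by simp; omega),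
          PySem.List.pyGetD_neg_natCast t level.toNat 0 h1n h2n]
      have hidx : (d :: t).length - level.toNat = (t.length - level.toNat) + 1 := by
        simp; omega
      have hexp : ((((t.length : Int) + 1) - ((level.toNat : Nat) : Int) + 1)).toNat
          = (((t.length : Int) - ((level.toNat : Nat) : Int) + 1)).toNat + 1 := by omega
      rw [hexp, pow_succ]
      have hget : (d :: t)[(d :: t).length - level.toNat]'(by simp; omega)
          = t[t.length - level.toNat]'(by omega) := by
        simp only [hidx]
        exact List.getElem_cons_succ ..
      rw [hget]; ring
    rw [hmap]
    have hpull : ((PySem.List.pyRange 1 ((t.length : Int) + 1) 1).map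
        (fun level => 8 * ((PySem.List.pyGetD t (-level) 0)
          * 8 ^ (((t.length : Int) - level + 1).toNat)))).sum
        = 8 * ((PySem.List.pyRange 1 ((t.length : Int) + 1) 1).map
        (fun level => (PySem.List.pyGetD t (-level) 0)
          * 8 ^ (((t.length : Int) - level + 1).toNat))).sum := by
      simp [List.sum_map_mul_left]
    rw [hpull, ih]
    simp only [List.map_cons, List.map_nil, List.sum_cons, List.sum_nil, add_zero]
    rw [hlast]
    simp only [List.foldr]; ring

-- ===== VERDICT (by name: the statement is the Claim_ definition above) =====
theorem get_a_range_spec : Claim_equal_get_a_range := by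
  intro indices _
  show _ = _
  unfold get_a_range get_a_range_alt
  simp only
  rw [PySem.List.foldl_add, pv_sum_horner, pv_alt_acc]
  simp only [Prod.mk.injEq]
  constructor <;> ring
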